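-- pv_equiv track=rewrite | github.com/AbhilashaLodha/Data-Structures-and-Algorithms | Resursion/maze_path.py | maze_path
-- ===== SOURCE A (Python) =====
-- def maze_path(i, j, m, n):
--     if(i == m - 1 and j == n - 1):
--         return 1
--
--     paths = 0
--     if(j + 1 < n):  # right
--         paths += maze_path(i, j + 1, m, n)
--
--     if(i + 1 < m): # down
--         paths += maze_path(i + 1, j, m , n)
--
--     if(i + 1 < m and j + 1 < n): #diagonal path \
--         paths += maze_path(i + 1, j + 1, m, n)
--
--     return paths
-- ===== SOURCE B (Python) =====
-- def maze_path(i, j, m, n):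
--     # Bottom-up Delannoy DP over remaining distances (right/down/diagonal moves).
--     a = m - 1 - i
--     b = n - 1 - j
--     if a < 0 or b < 0:
--         return 0
--     row = [1] * (b + 1)
--     for _ in range(a):
--         new = [1]
--         prev = 1
--         for x, y in zip(row, row[1:]):
--             prev = prev + y + x
--             new.append(prev)
--         row = new
--     return row[b]
-- ===== Notes on version B (the rewrite author's own statement) =====
-- stated objective: alternative
-- what changed: Replaces A's three-way recursion over grid cells by a bottom-up dynamic program that fills the Delannoy-number row of the grid one row at a time and reads off the target cell.
-- outside the precondition, e.g. on maze_path(0, 0, 1, 952): A returns 1, B returns 1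
import Mathlib
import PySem

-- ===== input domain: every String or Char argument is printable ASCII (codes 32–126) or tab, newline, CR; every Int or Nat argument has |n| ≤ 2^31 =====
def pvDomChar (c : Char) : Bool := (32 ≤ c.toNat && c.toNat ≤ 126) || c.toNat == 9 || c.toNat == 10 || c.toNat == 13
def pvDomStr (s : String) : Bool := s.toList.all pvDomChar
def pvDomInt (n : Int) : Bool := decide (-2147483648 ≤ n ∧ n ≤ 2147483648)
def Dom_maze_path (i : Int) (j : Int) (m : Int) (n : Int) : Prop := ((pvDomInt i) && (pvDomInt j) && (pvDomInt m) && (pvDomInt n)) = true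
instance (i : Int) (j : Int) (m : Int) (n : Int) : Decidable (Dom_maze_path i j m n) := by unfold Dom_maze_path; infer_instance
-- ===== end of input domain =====

-- B replaces A's three-way recursion by a bottom-up dynamic program that fills the Delannoy row of the grid row by row (a different algorithm for the same count).

-- ===== PORT A =====
-- literal transliteration of A's recursion (right, then down, then diagonal)
def maze_path (i : Int) (j : Int) (m : Int) (n : Int) : Int :=
  if i = m - 1 ∧ j = n - 1 then 1
  else
    (if j + 1 < n then maze_path i (j + 1) m n else 0) +
    (if i + 1 < m then maze_path (i + 1) j m n else 0) +
    (if i + 1 < m ∧ j + 1 < n then maze_path (i + 1) (j + 1) m n else 0)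
termination_by ((m - i).toNat + (n - j).toNat)
decreasing_by all_goals omega

-- ===== PORT B =====
-- inner loop of Source B: new = [1]; prev = 1; for x, y in zip(row, row[1:]): prev = prev + y + x; new.append(prev)
def nextRow (row : List Int) : List Int :=
  ((row.zip (row.drop 1)).foldl
    (fun (st : Int × List Int) xy =>
      let p := st.1 + xy.2 + xy.1
      (p, st.2 ++ [p]))
    (1, [1])).2

def maze_path_alt (i : Int) (j : Int) (m : Int) (n : Int) : Int :=
  let a := m - 1 - i
  let b := n - 1 - j
  if a < 0 ∨ b < 0 then 0
  else
    let row := (List.range a.toNat).foldl (fun r _ => nextRow r) (List.replicate (b.toNat + 1) 1)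
    row.getD b.toNat 0   -- row[b]; the index b is always in range (the row has b+1 entries)

-- ===== PRECONDITION & SPEC =====
-- Pre_ excludes inputs whose recursion depth in A (remaining right steps plus remaining down
-- steps, clamped at 0) exceeds 900: on those Python A overflows the call stack (RecursionError,
-- default recursion limit ~1000); 900 leaves a safety margin for the interpreter's own frames,
-- so a thin band of still-returning inputs (depth 901..~997) is excluded with the raising ones.
def Pre_maze_path (i : Int) (j : Int) (m : Int) (n : Int) : Prop :=
  (m - 1 - i).toNat + (n - 1 - j).toNat ≤ 900
instance (i : Int) (j : Int) (m : Int) (n : Int) : Decidable (Pre_maze_path i j m n) := by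
  unfold Pre_maze_path; infer_instance
def pvWitness_maze_path : Int × Int × Int × Int := (0, 0, 3, 3)

def Spec_maze_path (i : Int) (j : Int) (m : Int) (n : Int) (out : Int) : Prop := out = maze_path_alt i j m n
instance (i : Int) (j : Int) (m : Int) (n : Int) (out : Int) : Decidable (Spec_maze_path i j m n out) := by unfold Spec_maze_path; infer_instance

-- ===== CLAIM (what is proved, stated in full; the proofs are below) =====
def Claim_equal_maze_path : Prop := ∀ (i : Int) (j : Int) (m : Int) (n : Int), Dom_maze_path i j m n → Pre_maze_path i j m n → Spec_maze_path i j m n (maze_path i j m n)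

-- ===== LEMMAS AND PROOFS =====

-- mathematical Delannoy numbers, the common specification of both ports
def del : Nat → Nat → Int
  | 0, _ => 1
  | _+1, 0 => 1
  | a+1, b+1 => del (a+1) b + del a (b+1) + del a b

def aVal (i j m n : Int) : Int :=
  if m - 1 - i < 0 ∨ n - 1 - j < 0 then 0 else del (m - 1 - i).toNat (n - 1 - j).toNat

lemma del_zero_left (b : Nat) : del 0 b = 1 := by simp [del]

lemma del_zero_right (a : Nat) : del a 0 = 1 := by cases a <;> simp [del]

lemma aVal_step (i j m n : Int) (hbase : ¬(i = m - 1 ∧ j = n - 1)) :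
    (if j + 1 < n then aVal i (j + 1) m n else 0) +
    (if i + 1 < m then aVal (i + 1) j m n else 0) +
    (if i + 1 < m ∧ j + 1 < n then aVal (i + 1) (j + 1) m n else 0) = aVal i j m n := by
  unfold aVal
  by_cases hneg : m - 1 - i < 0 ∨ n - 1 - j < 0
  · split_ifs <;> omega
  · have ha : 0 ≤ m - 1 - i := by omega
    have hb : 0 ≤ n - 1 - j := by omega
    by_cases ha1 : i + 1 < m
    · by_cases hb1 : j + 1 < n
      · -- a ≥ 1, b ≥ 1
        obtain ⟨A, hA⟩ : ∃ A : Nat, (m - 1 - i).toNat = A + 1 := ⟨(m - 2 - i).toNat, by omega⟩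
        obtain ⟨B, hB⟩ : ∃ B : Nat, (n - 1 - j).toNat = B + 1 := ⟨(n - 2 - j).toNat, by omega⟩
        rw [if_pos hb1, if_neg (by omega : ¬(m - 1 - i < 0 ∨ n - 1 - (j+1) < 0)),
          if_pos ha1, if_neg (by omega : ¬(m - 1 - (i+1) < 0 ∨ n - 1 - j < 0)),
          if_pos (⟨ha1, hb1⟩ : i + 1 < m ∧ j + 1 < n),
          if_neg (by omega : ¬(m - 1 - (i+1) < 0 ∨ n - 1 - (j+1) < 0)),
          if_neg hneg, hA, hB,
          show (n - 1 - (j+1)).toNat = B from by omega,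
          show (m - 1 - (i+1)).toNat = A from by omega]
        show del (A+1) B + del A (B+1) + del A B = del (A+1) (B+1)
        rw [del]
      · -- b = 0
        rw [if_neg hb1, if_pos ha1,
          if_neg (by omega : ¬(m - 1 - (i+1) < 0 ∨ n - 1 - j < 0)),
          if_neg (by omega : ¬(i + 1 < m ∧ j + 1 < n)), if_neg hneg,
          show (n - 1 - j).toNat = 0 from by omega, del_zero_right, del_zero_right]
        omega
    · by_cases hb1 : j + 1 < n
      · -- a = 0
        rw [if_pos hb1, if_neg (by omega : ¬(m - 1 - i < 0 ∨ n - 1 - (j+1) < 0)),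
          if_neg ha1, if_neg (by omega : ¬(i + 1 < m ∧ j + 1 < n)), if_neg hneg,
          show (m - 1 - i).toNat = 0 from by omega, del_zero_left, del_zero_left]
        omega
      · -- a = 0 and b = 0: contradicts hbase
        exact absurd ⟨by omega, by omega⟩ hbase

lemma maze_path_eq_aVal : ∀ (K : Nat) (i j m n : Int),
    (m - i).toNat + (n - j).toNat ≤ K → maze_path i j m n = aVal i j m n := by
  intro K
  induction K with
  | zero =>
    intro i j m n hK
    rw [maze_path, if_neg (by omega : ¬(i = m - 1 ∧ j = n - 1)),
      if_neg (by omega : ¬(j + 1 < n)), if_neg (by omega : ¬(i + 1 < m)),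
      if_neg (by omega : ¬(i + 1 < m ∧ j + 1 < n))]
    unfold aVal
    rw [if_pos (by omega)]
    omega
  | succ K ih =>
    intro i j m n hK
    by_cases hbase : i = m - 1 ∧ j = n - 1
    · rw [maze_path, if_pos hbase]
      unfold aVal
      obtain ⟨h1, h2⟩ := hbase
      rw [if_neg (by omega), show (m - 1 - i).toNat = 0 from by omega,
        show (n - 1 - j).toNat = 0 from by omega, del_zero_left]
    · rw [maze_path, if_neg hbase]
      have e1 : (if j + 1 < n then maze_path i (j + 1) m n else 0)
          = (if j + 1 < n then aVal i (j + 1) m n else 0) := by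
        split_ifs with h
        · exact ih i (j+1) m n (by omega)
        · rfl
      have e2 : (if i + 1 < m then maze_path (i + 1) j m n else 0)
          = (if i + 1 < m then aVal (i + 1) j m n else 0) := by
        split_ifs with h
        · exact ih (i+1) j m n (by omega)
        · rfl
      have e3 : (if i + 1 < m ∧ j + 1 < n then maze_path (i + 1) (j + 1) m n else 0)
          = (if i + 1 < m ∧ j + 1 < n then aVal (i + 1) (j + 1) m n else 0) := by
        split_ifs with h
        · exact ih (i+1) (j+1) m n (by omega)
        · rfl
      rw [e1, e2, e3]
      exact aVal_step i j m n hbase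

-- ----- B side -----

def rowOf (s b : Nat) : List Int := (List.range (b + 1)).map (fun t => del s t)

lemma zip_succ : ∀ (k : Nat) (f : Nat → Int),
    ((List.range (k + 1)).map f).zip (((List.range (k + 1)).map f).drop 1)
      = (List.range k).map (fun u => (f u, f (u + 1))) := by
  intro k
  induction k with
  | zero => intro f; rfl
  | succ k ih =>
    intro f
    have hL : (List.range (k + 2)).map f = f 0 :: ((List.range (k + 1)).map (f ∘ Nat.succ)) := by
      rw [List.range_succ_eq_map, List.map_cons, List.map_map]
    have hhead : (List.range (k + 1)).map (f ∘ Nat.succ)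
        = (f ∘ Nat.succ) 0 :: ((List.range k).map ((f ∘ Nat.succ) ∘ Nat.succ)) := by
      rw [List.range_succ_eq_map, List.map_cons, List.map_map]
    have hdrop : ((List.range (k + 1)).map (f ∘ Nat.succ)).drop 1
        = (List.range k).map ((f ∘ Nat.succ) ∘ Nat.succ) := by
      rw [hhead, List.drop_one, List.tail_cons]
    rw [hL, List.drop_one, List.tail_cons, hhead, List.zip_cons_cons, ← hhead, ← hdrop,
      ih (f ∘ Nat.succ)]
    rw [List.range_succ_eq_map, List.map_cons, List.map_map]
    simp [Function.comp]

lemma innerFold (s : Nat) : ∀ (k t0 : Nat) (acc : List Int),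
    ((List.range k).map (fun u => (del s (t0 + u), del s (t0 + u + 1)))).foldl
      (fun (st : Int × List Int) xy =>
        let p := st.1 + xy.2 + xy.1
        (p, st.2 ++ [p]))
      (del (s + 1) t0, acc)
    = (del (s + 1) (t0 + k), acc ++ (List.range k).map (fun u => del (s + 1) (t0 + u + 1))) := by
  intro k
  induction k with
  | zero => intro t0 acc; simp
  | succ k ih =>
    intro t0 acc
    rw [List.range_succ_eq_map, List.map_cons, List.map_map, List.foldl_cons]
    have hstep : del (s + 1) t0 + del s (t0 + 1) + del s t0 = del (s + 1) (t0 + 1) := by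
      rw [show del (s + 1) (t0 + 1) = del (s + 1) t0 + del s (t0 + 1) + del s t0 from by rw [del]]
    simp only [Nat.add_zero]
    rw [hstep]
    have hshift : ((fun u => (del s (t0 + u), del s (t0 + u + 1))) ∘ Nat.succ)
        = (fun u => (del s (t0 + 1 + u), del s (t0 + 1 + u + 1))) := by
      funext u
      simp [Function.comp]
      constructor <;> (congr 1; omega)
    rw [hshift, ih (t0 + 1) (acc ++ [del (s + 1) (t0 + 1)])]
    rw [List.map_cons, List.map_map, List.append_assoc, List.singleton_append,
      show t0 + 1 + k = t0 + (k + 1) from by omega,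
      show ((fun u => del (s + 1) (t0 + u + 1)) ∘ Nat.succ)
          = (fun u => del (s + 1) (t0 + 1 + u + 1)) from by
        funext u; simp only [Function.comp_apply]; congr 1; omega]

lemma nextRow_rowOf (s b : Nat) : nextRow (rowOf s b) = rowOf (s + 1) b := by
  unfold nextRow rowOf
  rw [zip_succ b (fun t => del s t)]
  rw [show ((1 : Int), ([1] : List Int)) = (del (s + 1) 0, [del (s + 1) 0]) from by
    rw [del_zero_right]]
  rw [show (fun u => (del s u, del s (u + 1))) = (fun u => (del s (0 + u), del s (0 + u + 1)))
      from by funext u; simp]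
  rw [innerFold s b 0 [del (s + 1) 0]]
  rw [List.range_succ_eq_map, List.map_cons, List.map_map]
  simp [Function.comp]

lemma rowOf_zero (b : Nat) : rowOf 0 b = List.replicate (b + 1) 1 := by
  unfold rowOf
  have h : (fun t => del 0 t) = (fun _ : Nat => (1 : Int)) := by
    funext t; exact del_zero_left t
  rw [h]
  simp [List.map_const']

lemma outerFold (b : Nat) : ∀ (a : Nat),
    (List.range a).foldl (fun r _ => nextRow r) (rowOf 0 b) = rowOf a b := by
  intro a
  induction a with
  | zero => rfl
  | succ a ih => rw [List.range_succ, List.foldl_append, ih, List.foldl_cons, List.foldl_nil,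
      nextRow_rowOf]

lemma rowOf_getD (a b : Nat) : (rowOf a b).getD b 0 = del a b := by
  unfold rowOf
  rw [List.getD_eq_getElem?_getD, List.getElem?_map, List.getElem?_range (by omega : b < b + 1)]
  rfl

lemma maze_path_alt_eq_aVal (i j m n : Int) : maze_path_alt i j m n = aVal i j m n := by
  simp only [maze_path_alt, aVal]
  by_cases h : m - 1 - i < 0 ∨ n - 1 - j < 0
  · rw [if_pos h, if_pos h]
  · rw [if_neg h, if_neg h, ← rowOf_zero, outerFold, rowOf_getD]

-- ===== VERDICT (by name: the statement is the Claim_ definition above) =====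
theorem maze_path_spec : Claim_equal_maze_path := by
  intro i j m n _ _
  unfold Spec_maze_path
  rw [maze_path_eq_aVal ((m - i).toNat + (n - j).toNat) i j m n le_rfl, maze_path_alt_eq_aVal]
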